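-- pv_equiv track=rewrite | github.com/zzangw00/problem-solving | 프로그래머스/1단계/모의고사.py | solution
-- ===== SOURCE A (Python) =====
-- def solution(answers):
--     result = []
--     check = []
--     arr = [[1, 2, 3, 4, 5], [2, 1, 2, 3, 2, 4, 2, 5],
--            [3, 3, 1, 1, 2, 2, 4, 4, 5, 5]]
--     for i in range(3):
--         count = 0
--         k = 0
--         for j in range(len(answers)):
--             if k > len(arr[i]) - 1:
--                 k = 0
--             if answers[j] == arr[i][k]:
--                 count += 1
--             k += 1
--         check.append(count)
--     for i in range(len(check)):
--         if check[i] == max(check):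
--             result.append(i + 1)
--
--     return result
-- ===== SOURCE B (Python) =====
-- def solution(answers):
--     # lcm(5, 8, 10) = 40: every supervisor's guess is a function of position mod 40.
--     # One pass builds a histogram keyed by (position % 40, answer); each score is
--     # then 40 table lookups, with no per-answer pattern comparison at all.
--     freq = {}
--     for j, a in enumerate(answers):
--         key = (j % 40, a)
--         freq[key] = freq.get(key, 0) + 1
--     pats = [[1, 2, 3, 4, 5], [2, 1, 2, 3, 2, 4, 2, 5],
--             [3, 3, 1, 1, 2, 2, 4, 4, 5, 5]]
--     scores = [sum(freq.get((r, p[r % len(p)]), 0) for r in range(40))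
--               for p in pats]
--     m = max(scores)
--     return [i + 1 for i, s in enumerate(scores) if s == m]
-- ===== Notes on version B (the rewrite author's own statement) =====
-- stated objective: alternative
-- what changed: B never compares answers against the patterns: it builds a histogram dict keyed by (position mod 40, answer) in one pass (40 = lcm of the pattern lengths) and then computes each supervisor's score as 40 table lookups, whereas A runs a per-pattern cursor loop over the answers for each supervisor.
import Mathlib
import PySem

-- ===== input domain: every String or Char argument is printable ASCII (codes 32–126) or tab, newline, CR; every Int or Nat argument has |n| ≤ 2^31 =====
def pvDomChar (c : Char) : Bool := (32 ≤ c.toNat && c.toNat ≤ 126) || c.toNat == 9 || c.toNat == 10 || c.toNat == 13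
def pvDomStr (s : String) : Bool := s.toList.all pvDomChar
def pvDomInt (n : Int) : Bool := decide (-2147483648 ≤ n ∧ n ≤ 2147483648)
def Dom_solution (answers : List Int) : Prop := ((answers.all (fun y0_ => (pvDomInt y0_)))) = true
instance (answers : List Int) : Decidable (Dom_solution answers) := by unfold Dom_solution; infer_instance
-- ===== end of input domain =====

-- B replaces A's three per-pattern cursor loops over answers by a histogram dict keyed by
-- (position mod 40, answer) built in one pass; each score is then 40 table lookups ('alternative').

-- ===== PORT A =====
-- A's inner loop for one pattern: state (count, k); k is reset to 0 when it runs past the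
-- pattern (k is always ≥ 0 in Python, so Nat is exact); pat[k] is always in range, so
-- List.getD with default 0 is exact here.
def solutionPass (pat : List Int) (answers : List Int) : Int :=
  (answers.foldl
    (fun (s : Int × Nat) a =>
      let k := if s.2 > pat.length - 1 then 0 else s.2
      ((if a = pat.getD k 0 then s.1 + 1 else s.1), k + 1))
    (0, 0)).1

def solution (answers : List Int) : List Int :=
  let arr : List (List Int) := [[1, 2, 3, 4, 5], [2, 1, 2, 3, 2, 4, 2, 5],
                                [3, 3, 1, 1, 2, 2, 4, 4, 5, 5]]
  let check : List Int := arr.foldl (fun acc pat => acc ++ [solutionPass pat answers]) []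
  -- for i in range(len(check)): if check[i] == max(check): result.append(i+1)
  (PySem.List.enumerate check 0).foldl
    (fun res ic =>
      if ic.2 = (PySem.List.max? check (fun y => y)).getD 0 then res ++ [ic.1 + 1] else res) []

-- ===== PORT B =====
-- histogram over (j % 40, answers[j]) built in one pass (dict with tuple keys), then each
-- supervisor's score = sum of 40 lookups; p[r % len(p)] is always in range (pyGetD is exact).
def solution_alt (answers : List Int) : List Int :=
  let freq := (PySem.List.enumerate answers 0).foldl
    (fun d x =>
      let k := (x.1 % 40, x.2)
      d.insert k (d.getD k 0 + 1))
    (PySem.Dict.empty (κ := Int × Int) (ν := Int))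
  let pats : List (List Int) := [[1, 2, 3, 4, 5], [2, 1, 2, 3, 2, 4, 2, 5],
                                 [3, 3, 1, 1, 2, 2, 4, 4, 5, 5]]
  let scores : List Int := pats.map (fun p =>
    (PySem.List.pyRange 0 40 1).foldl
      (fun s r => s + freq.getD (r, PySem.List.pyGetD p (r % (p.length : Int)) 0) 0) 0)
  let m := (PySem.List.max? scores (fun y => y)).getD 0
  (PySem.List.enumerate scores 0).foldl
    (fun res is => if is.2 = m then res ++ [is.1 + 1] else res) []

-- ===== PRECONDITION & SPEC =====
def Spec_solution (answers : List Int) (out : List Int) : Prop := out = solution_alt answers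
instance (answers : List Int) (out : List Int) : Decidable (Spec_solution answers out) := by unfold Spec_solution; infer_instance

-- ===== CLAIM (what is proved, stated in full; the proofs are below) =====
def Claim_equal_solution : Prop := ∀ (answers : List Int), Dom_solution answers → Spec_solution answers (solution answers)

-- ===== LEMMAS AND PROOFS =====

-- the common reference count: matches of xs against pat cycled from position j
def cnt (pat : List Int) (L : Nat) : List Int → Nat → Int
  | [], _ => 0
  | a :: xs, j => (if a = pat.getD (j % L) 0 then 1 else 0) + cnt pat L xs (j + 1)

-- ---- A side: the cursor loop computes cnt ----
lemma succ_mod (j L : Nat) (hL : 0 < L) :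
    (j + 1) % L = if j % L + 1 = L then 0 else j % L + 1 := by
  have hmod : j % L < L := Nat.mod_lt _ hL
  rw [Nat.add_mod]
  rcases Nat.lt_or_ge 1 L with h1 | h1
  · rw [Nat.mod_eq_of_lt h1]
    split_ifs with hc
    · rw [hc, Nat.mod_self]
    · exact Nat.mod_eq_of_lt (by omega)
  · have hL1 : L = 1 := by omega
    subst hL1; simp [Nat.mod_one]

lemma passAux (pat : List Int) (L : Nat) (hlen : pat.length = L) (hL : 0 < L) :
    ∀ (xs : List Int) (c : Int) (j k : Nat), (k = j % L ∨ (k = L ∧ j % L = 0)) →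
      (xs.foldl
        (fun (s : Int × Nat) a =>
          let k := if s.2 > pat.length - 1 then 0 else s.2
          ((if a = pat.getD k 0 then s.1 + 1 else s.1), k + 1))
        (c, k)).1
      = c + cnt pat L xs j := by
  intro xs
  induction xs with
  | nil => intro c j k h; simp [cnt]
  | cons a xs ih =>
    intro c j k h
    have hmod : j % L < L := Nat.mod_lt _ hL
    have hk : (if k > pat.length - 1 then 0 else k) = j % L := by
      rw [hlen]; rcases h with h | ⟨h1, h2⟩ <;> split_ifs <;> omega
    have hnext : j % L + 1 = (j + 1) % L ∨ (j % L + 1 = L ∧ (j + 1) % L = 0) := by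
      rw [succ_mod j L hL]
      split_ifs with hc
      · exact Or.inr ⟨hc, rfl⟩
      · exact Or.inl rfl
    simp only [List.foldl_cons, cnt]
    rw [show ((if k > pat.length - 1 then 0 else k) : Nat) = j % L from hk]
    rw [ih _ (j + 1) _ hnext]
    split_ifs <;> ring

lemma passEq (pat : List Int) (L : Nat) (hlen : pat.length = L) (hL : 0 < L)
    (answers : List Int) : solutionPass pat answers = cnt pat L answers 0 := by
  unfold solutionPass
  rw [passAux pat L hlen hL answers 0 0 0 (Or.inl (by simp))]
  ring

-- ---- B side: the histogram lookup is a count over the keyed enumerate ----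
lemma freq_getD (answers : List Int) (k : Int × Int) :
    ((PySem.List.enumerate answers 0).foldl
      (fun d x => d.insert (x.1 % 40, x.2) (d.getD (x.1 % 40, x.2) 0 + 1))
      (PySem.Dict.empty (κ := Int × Int) (ν := Int))).getD k 0
    = (((PySem.List.enumerate answers 0).map (fun x => (x.1 % 40, x.2))).count k : Int) := by
  have h := PySem.Dict.getD_foldl_insert_add_one
    (l := (PySem.List.enumerate answers 0).map (fun x => (x.1 % 40, x.2)))
    (d := (PySem.Dict.empty (κ := Int × Int) (ν := Int))) (v := k)
  rw [List.foldl_map] at h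
  simpa [PySem.Dict.getD_empty] using h

lemma sum_ite_eq_of_nodup (r0 : Int) (f : Int → Int) :
    ∀ (l : List Int), l.Nodup → r0 ∈ l →
    (l.map (fun r => if r = r0 then f r else 0)).sum = f r0 := by
  intro l
  induction l with
  | nil => intro _ h; cases h
  | cons b t ih =>
    intro hnd h
    rcases List.nodup_cons.mp hnd with ⟨hb, hndt⟩
    rcases List.mem_cons.mp h with h0 | h0
    · subst h0
      have hz : (t.map (fun r => if r = r0 then f r else 0)).sum = 0 := by
        apply List.sum_eq_zero
        intro x hx
        rcases List.mem_map.mp hx with ⟨r, hr, hrx⟩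
        have hrb : r ≠ r0 := fun he => hb (he ▸ hr)
        simp [← hrx, hrb]
      simp [hz]
    · have hbne : b ≠ r0 := fun he => hb (he ▸ h0)
      simp [hbne, ih hndt h0]

lemma score_eq (pat : List Int) (L : Nat) (hL : 0 < L) (hdvd : L ∣ 40) :
    ∀ (xs : List Int) (j : Nat),
    (PySem.List.pyRange 0 40 1).foldl
      (fun s r => s +
        ((((PySem.List.enumerate xs (j : Int)).map (fun x => (x.1 % 40, x.2))).count
          (r, PySem.List.pyGetD pat (r % (L : Int)) 0) : Int))) 0
    = cnt pat L xs j := by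
  intro xs
  induction xs with
  | nil =>
    intro j
    simp [PySem.List.enumerate_nil, cnt]
  | cons a xs ih =>
    intro j
    have e40 : ((j : Int) % 40) = ((j % 40 : Nat) : Int) := by
      push_cast; rfl
    have eget : PySem.List.pyGetD pat (((j % 40 : Nat) : Int) % (L : Int)) 0
        = pat.getD (j % L) 0 := by
      have h1 : (((j % 40 : Nat) : Int) % (L : Int)) = ((j % 40 % L : Nat) : Int) := by
        push_cast; rfl
      rw [h1, Nat.mod_mod_of_dvd j hdvd, PySem.List.pyGetD_natCast]
    have ih' := ih (j + 1)
    rw [PySem.List.foldl_add, zero_add] at ih'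
    rw [PySem.List.foldl_add, zero_add]
    have hcast : ((j + 1 : Nat) : Int) = ((j : Int) + 1) := by push_cast; ring
    rw [hcast] at ih'
    simp only [PySem.List.enumerate_cons, List.map_cons, List.count_cons, Nat.cast_add]
    rw [PySem.List.sum_map_add_int]
    rw [ih']
    have hind :
        ((PySem.List.pyRange 0 40 1).map (fun r =>
            ((if (((j : Int) % 40, a) == (r, PySem.List.pyGetD pat (r % (L : Int)) 0)) then 1 else 0 : Nat) : Int))).sum
        = if a = pat.getD (j % L) 0 then 1 else 0 := by
      have hmem : ((j % 40 : Nat) : Int) ∈ PySem.List.pyRange 0 40 1 := by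
        rw [PySem.List.mem_pyRange_one]
        refine ⟨Int.natCast_nonneg _, ?_⟩
        exact_mod_cast Nat.mod_lt j (by norm_num)
      have hrw : ∀ r ∈ PySem.List.pyRange 0 40 1,
          ((if (((j : Int) % 40, a) == (r, PySem.List.pyGetD pat (r % (L : Int)) 0)) then 1 else 0 : Nat) : Int)
          = (fun r => if r = ((j % 40 : Nat) : Int)
              then (if a = PySem.List.pyGetD pat (r % (L : Int)) 0 then 1 else 0) else 0) r := by
        intro r _
        by_cases hr : r = ((j % 40 : Nat) : Int)
        · subst hr
          rw [← e40]
          by_cases ha : a = PySem.List.pyGetD pat (((j : Int) % 40) % (L : Int)) 0 <;>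
            simp [ha]
        · have hfalse : (((j : Int) % 40, a) == (r, PySem.List.pyGetD pat (r % (L : Int)) 0)) = false := by
            rw [e40]
            simp only [beq_eq_false_iff_ne, ne_eq, Prod.mk.injEq, not_and]
            intro hc; exact absurd hc.symm hr
          beta_reduce
          rw [if_neg hr]
          simp [hfalse]
      rw [List.map_congr_left hrw]
      rw [sum_ite_eq_of_nodup _ _ _ (PySem.List.nodup_pyRange_one 0 40) hmem]
      rw [eget]
    rw [hind]
    simp only [cnt]
    ring

lemma score_eq0 (pat : List Int) (L : Nat) (hL : 0 < L) (hdvd : L ∣ 40)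
    (xs : List Int) :
    (PySem.List.pyRange 0 40 1).foldl
      (fun s r => s +
        ((((PySem.List.enumerate xs 0).map (fun x => (x.1 % 40, x.2))).count
          (r, PySem.List.pyGetD pat (r % (L : Int)) 0) : Int))) 0
    = cnt pat L xs 0 := by
  have h := score_eq pat L hL hdvd xs 0
  simpa using h

-- ===== VERDICT (by name: the statement is the Claim_ definition above) =====
theorem solution_spec : Claim_equal_solution := by
  intro answers _
  unfold Spec_solution solution solution_alt
  simp only [List.foldl_cons, List.foldl_nil, List.nil_append, List.map_cons, List.map_nil]
  simp only [passEq [1, 2, 3, 4, 5] 5 rfl (by norm_num),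
      passEq [2, 1, 2, 3, 2, 4, 2, 5] 8 rfl (by norm_num),
      passEq [3, 3, 1, 1, 2, 2, 4, 4, 5, 5] 10 rfl (by norm_num)]
  simp only [freq_getD]
  rw [show ([1, 2, 3, 4, 5] : List Int).length = 5 from rfl,
      show ([2, 1, 2, 3, 2, 4, 2, 5] : List Int).length = 8 from rfl,
      show ([3, 3, 1, 1, 2, 2, 4, 4, 5, 5] : List Int).length = 10 from rfl]
  rw [score_eq0 [1, 2, 3, 4, 5] 5 (by norm_num) (by norm_num) answers,
      score_eq0 [2, 1, 2, 3, 2, 4, 2, 5] 8 (by norm_num) (by norm_num) answers,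
      score_eq0 [3, 3, 1, 1, 2, 2, 4, 4, 5, 5] 10 (by norm_num) (by norm_num) answers]
  simp only [List.cons_append, List.nil_append]
  rfl
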